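-- pv_equiv track=rewrite | github.com/tjcdev/leetcode | trees/meta_level2_rotary.py | helper
-- ===== SOURCE A (Python) =====
-- from typing import List
-- from typing import List
--
-- def helper(C: List, dial1: int, dial2: int, N: int):
--   if len(C) == 0:
--     return 0
--
--   min_dial_1_turn = min(((dial1 - C[0]) % N), ((C[0] - dial1) % N))
--   min_dial_2_turn = min(((dial2 - C[0]) % N), ((C[0] - dial2) % N))
--   dial1_cost = min_dial_1_turn + helper(C[1:], C[0], dial2, N)
--   dial2_cost = min_dial_2_turn + helper(C[1:], dial1, C[0],  N)
--
--   return min(dial1_cost, dial2_cost)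
-- ===== SOURCE B (Python) =====
-- def helper(C, dial1, dial2, N):
--   # Bottom-up DP over (suffix, other-dial value) instead of A's exponential branching.
--   if len(C) == 0:
--     return 0
--
--   def d(a, b):
--     return min((a - b) % N, (b - a) % N)
--
--   cands = [dial1, dial2] + C  # every value the idle dial can hold
--
--   def table(sub):
--     # {o: min turns to dial sub[1:] given dials (sub[0], o)} for each candidate o
--     if len(sub) <= 1:
--       return {o: 0 for o in cands}
--     g = table(sub[1:])
--     prev, c = sub[0], sub[1]
--     return {o: min(d(prev, c) + g[o], d(o, c) + g[prev]) for o in cands}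
--
--   g = table(C)
--   return min(d(dial1, C[0]) + g[dial2], d(dial2, C[0]) + g[dial1])
-- ===== Notes on version B (the rewrite author's own statement) =====
-- stated objective: faster
-- what changed: Replaced A's exponential two-branch recursion by a bottom-up DP that, per suffix, tabulates the minimal cost for every possible idle-dial value, so each suffix is solved once instead of 2^i times.
import Mathlib
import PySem

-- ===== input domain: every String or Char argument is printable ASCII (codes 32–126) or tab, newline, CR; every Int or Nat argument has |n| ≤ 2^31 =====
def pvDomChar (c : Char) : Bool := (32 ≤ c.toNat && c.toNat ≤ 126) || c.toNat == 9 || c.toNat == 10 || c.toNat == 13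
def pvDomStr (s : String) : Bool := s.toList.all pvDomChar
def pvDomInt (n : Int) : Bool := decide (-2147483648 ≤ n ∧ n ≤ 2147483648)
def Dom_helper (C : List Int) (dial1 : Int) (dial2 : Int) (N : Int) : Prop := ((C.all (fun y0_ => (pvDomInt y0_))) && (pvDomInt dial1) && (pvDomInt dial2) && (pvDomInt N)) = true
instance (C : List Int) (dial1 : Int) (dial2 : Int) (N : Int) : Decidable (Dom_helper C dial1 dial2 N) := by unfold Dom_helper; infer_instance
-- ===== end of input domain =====

-- B replaces A's exponential branching recursion by an O(n^2) bottom-up DP tabulating,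
-- for each suffix, the cost for every possible idle-dial value.

-- ===== PORT A =====
-- min((a-b)%N, (b-a)%N): Python's % is PySem.Int.mod
def pyDialTurn (a b N : Int) : Int :=
  min (PySem.Int.mod (a - b) N) (PySem.Int.mod (b - a) N)

def helper (C : List Int) (dial1 : Int) (dial2 : Int) (N : Int) : Int :=
  match C with
  | [] => 0
  | c :: rest =>
      let min_dial_1_turn := pyDialTurn dial1 c N
      let min_dial_2_turn := pyDialTurn dial2 c N
      let dial1_cost := min_dial_1_turn + helper rest c dial2 N
      let dial2_cost := min_dial_2_turn + helper rest dial1 c N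
      min dial1_cost dial2_cost

-- ===== PORT B =====
-- dict comprehension {o: f o for o in cands} as an association list in key order
def mkTbl (cands : List Int) (f : Int → Int) : List (Int × Int) :=
  cands.map (fun o => (o, f o))

-- Python g[k] (key always present in B; first match, per the dict convention)
def tblGet (t : List (Int × Int)) (k : Int) : Int :=
  match t.find? (fun p => p.1 == k) with
  | some p => p.2
  | none => 0

-- table(sub): {o: min turns to dial sub[1:] given dials (sub[0], o)} for o in cands
def tableB (cands : List Int) (N : Int) : List Int → List (Int × Int)
  | [] => mkTbl cands (fun _ => 0)
  | [_] => mkTbl cands (fun _ => 0)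
  | p :: c :: rest =>
      let g := tableB cands N (c :: rest)
      mkTbl cands (fun o =>
        min (pyDialTurn p c N + tblGet g o) (pyDialTurn o c N + tblGet g p))

def helper_alt (C : List Int) (dial1 : Int) (dial2 : Int) (N : Int) : Int :=
  match C with
  | [] => 0
  | c0 :: _ =>
      let cands := dial1 :: dial2 :: C
      let g := tableB cands N C
      min (pyDialTurn dial1 c0 N + tblGet g dial2)
          (pyDialTurn dial2 c0 N + tblGet g dial1)

-- ===== PRECONDITION & SPEC =====
-- Pre_ excludes exactly the inputs where Python A raises ZeroDivisionError: N = 0 with C nonempty.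
def Pre_helper (C : List Int) (dial1 : Int) (dial2 : Int) (N : Int) : Prop := C = [] ∨ N ≠ 0
instance (C : List Int) (dial1 : Int) (dial2 : Int) (N : Int) : Decidable (Pre_helper C dial1 dial2 N) := by unfold Pre_helper; infer_instance

def pvWitness_helper : List Int × Int × Int × Int := ([3, 1, 4], 0, 5, 10)

def Spec_helper (C : List Int) (dial1 : Int) (dial2 : Int) (N : Int) (out : Int) : Prop := out = helper_alt C dial1 dial2 N
instance (C : List Int) (dial1 : Int) (dial2 : Int) (N : Int) (out : Int) : Decidable (Spec_helper C dial1 dial2 N out) := by unfold Spec_helper; infer_instance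

-- ===== CLAIM (what is proved, stated in full; the proofs are below) =====
def Claim_equal_helper : Prop := ∀ (C : List Int) (dial1 : Int) (dial2 : Int) (N : Int), Dom_helper C dial1 dial2 N → Pre_helper C dial1 dial2 N → Spec_helper C dial1 dial2 N (helper C dial1 dial2 N)

-- ===== LEMMAS AND PROOFS =====

theorem helper_symm (C : List Int) (a b N : Int) :
    helper C a b N = helper C b a N := by
  induction C generalizing a b with
  | nil => rfl
  | cons c rest ih =>
      simp only [helper]
      rw [ih c b, ih a c]
      exact min_comm _ _

theorem tblGet_mkTbl (cands : List Int) (f : Int → Int) (k : Int) (hk : k ∈ cands) :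
    tblGet (mkTbl cands f) k = f k := by
  induction cands with
  | nil => cases hk
  | cons x xs ih =>
      simp only [mkTbl, List.map, tblGet, List.find?]
      by_cases h : x = k
      · subst h; simp
      · have : (x == k) = false := by simp [h]
        simp only [this]
        have hk' : k ∈ xs := by
          rcases List.mem_cons.mp hk with h1 | h1
          · exact absurd h1.symm h
          · exact h1
        simpa [mkTbl, tblGet] using ih hk'

theorem tableB_correct (cands : List Int) (N : Int) (rest : List Int) :
    ∀ c, c ∈ cands → (∀ x, x ∈ rest → x ∈ cands) →
    ∀ o, o ∈ cands → tblGet (tableB cands N (c :: rest)) o = helper rest c o N := by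
  induction rest with
  | nil =>
      intro c _ _ o ho
      simpa [tableB, helper] using tblGet_mkTbl cands (fun _ => 0) o ho
  | cons c2 rest2 ih =>
      intro c hc hsub o ho
      have hc2 : c2 ∈ cands := hsub c2 (List.mem_cons_self ..)
      have hsub2 : ∀ x, x ∈ rest2 → x ∈ cands := fun x hx => hsub x (List.mem_cons_of_mem _ hx)
      simp only [tableB]
      rw [tblGet_mkTbl cands _ o ho]
      rw [ih c2 hc2 hsub2 o ho, ih c2 hc2 hsub2 c hc]
      simp only [helper]
      rw [helper_symm rest2 c c2]

-- ===== VERDICT (by name: the statement is the Claim_ definition above) =====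
theorem helper_spec : Claim_equal_helper := by
  intro C dial1 dial2 N _ _
  unfold Spec_helper
  cases C with
  | nil => rfl
  | cons c0 rest =>
      have hc0 : c0 ∈ dial1 :: dial2 :: c0 :: rest := by simp
      have hsub : ∀ x, x ∈ rest → x ∈ dial1 :: dial2 :: c0 :: rest := by
        intro x hx; simp [hx]
      have h1 := tableB_correct (dial1 :: dial2 :: c0 :: rest) N rest c0 hc0 hsub dial2 (by simp)
      have h2 := tableB_correct (dial1 :: dial2 :: c0 :: rest) N rest c0 hc0 hsub dial1 (by simp)
      simp only [helper, helper_alt]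
      rw [h1, h2, helper_symm rest c0 dial1]
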